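-- pv_equiv track=rewrite | github.com/tomsilver/programmatic-policy-learning | src/programmatic_policy_learning/dsl/llm_primitives/baselines/llm_based/transition_analyzer.py | _find_token_clusters
-- ===== SOURCE A (Python) =====
-- from collections import deque
--
-- def _find_token_clusters(
--     positions: list[tuple[int, int]],
-- ) -> list[list[tuple[int, int]]]:
--     """Return sorted connected components (4-neighborhood) of token
--     positions."""
--
--     tokens: set[tuple[int, int]] = {(int(r), int(c)) for (r, c) in positions}
--     visited: set[tuple[int, int]] = set()
--     clusters: list[list[tuple[int, int]]] = []
--     for start in sorted(tokens):
--         if start in visited: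
--             continue
--         queue: deque[tuple[int, int]] = deque([start])
--         visited.add(start)
--         cluster: list[tuple[int, int]] = []
--         while queue:
--             cell = queue.popleft()
--             cluster.append(cell)
--             for dr, dc in ((-1, 0), (1, 0), (0, -1), (0, 1)):
--                 neighbor = (cell[0] + dr, cell[1] + dc)
--                 if neighbor in tokens and neighbor not in visited:
--                     visited.add(neighbor)
--                     queue.append(neighbor)
--         cluster.sort()
--         clusters.append(cluster)
--
--     clusters.sort(key=lambda c: c[0])
--     return clusters
-- ===== SOURCE B (Python) =====
-- def _find_token_clusters(
--     positions: list[tuple[int, int]],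
-- ) -> list[list[tuple[int, int]]]:
--     """Union-find over the token set: union each token with its right and
--     down neighbour, keeping the smaller tuple as the root, then group the
--     sorted tokens by root (so each group is sorted and groups appear in
--     order of their minimum)."""
--     tokens = {(int(r), int(c)) for (r, c) in positions}
--     ts = sorted(tokens)
--     parent = {t: t for t in ts}
--
--     def find(t):
--         while parent[t] != t:
--             t = parent[t]
--         return t
--
--     for (r, c) in ts:
--         for nb in ((r, c + 1), (r + 1, c)):
--             if nb in tokens:
--                 ra, rb = find((r, c)), find(nb)
--                 if ra != rb:
--                     if rb < ra:
--                         ra, rb = rb, ra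
--                     parent[rb] = ra
--
--     groups: dict[tuple[int, int], list[tuple[int, int]]] = {}
--     for t in ts:
--         groups.setdefault(find(t), []).append(t)
--     return list(groups.values())
-- ===== Notes on version B (the rewrite author's own statement) =====
-- stated objective: alternative
-- what changed: Replaces the BFS with deque+visited-set per start by a union-find: a parent dict over the token set, unioning each token with its right and down neighbour (smaller tuple kept as root), then grouping the sorted tokens by root; groups come out sorted and ordered by their minimum with no per-cluster sort and no final sort.
import Mathlib
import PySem

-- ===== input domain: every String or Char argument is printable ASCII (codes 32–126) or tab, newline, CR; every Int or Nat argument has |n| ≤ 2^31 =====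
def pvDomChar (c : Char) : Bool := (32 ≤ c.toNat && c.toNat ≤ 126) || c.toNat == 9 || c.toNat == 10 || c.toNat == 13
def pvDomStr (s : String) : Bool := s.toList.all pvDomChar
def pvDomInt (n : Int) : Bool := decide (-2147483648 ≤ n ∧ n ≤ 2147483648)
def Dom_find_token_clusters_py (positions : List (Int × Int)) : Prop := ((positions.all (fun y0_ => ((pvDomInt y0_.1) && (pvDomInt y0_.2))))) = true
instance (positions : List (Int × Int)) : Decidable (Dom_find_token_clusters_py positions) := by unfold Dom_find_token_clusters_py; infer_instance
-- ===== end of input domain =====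

-- B replaces A's per-start BFS (deque + global visited set + two sorts) by a union-find over the
-- token set keyed by right/down neighbour edges (smaller tuple kept as root), grouping the sorted
-- tokens by root; objective: alternative algorithm of similar cost.

-- ===== PORT A =====
-- the tuple of 4-neighbourhood offsets applied to a cell
def pvNbrs (c : Int × Int) : List (Int × Int) :=
  [(c.1 - 1, c.2), (c.1 + 1, c.2), (c.1, c.2 - 1), (c.1, c.2 + 1)]

-- the inner 'for dr, dc in …' loop: push unvisited token neighbours of cell
def pvStep (tokens : PySem.Set (Int × Int)) (cell : Int × Int)
    (vq : PySem.Set (Int × Int) × List (Int × Int)) :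
    PySem.Set (Int × Int) × List (Int × Int) :=
  (pvNbrs cell).foldl
    (fun vq n => if n ∈ tokens ∧ n ∉ vq.1 then (PySem.Set.add vq.1 n, vq.2 ++ [n]) else vq) vq

-- the 'while queue:' loop; fuel |tokens| is enough: each iteration moves one queued cell
-- (all distinct, all tokens) into the cluster
def pvBFS (tokens : PySem.Set (Int × Int)) :
    Nat → List (Int × Int) → PySem.Set (Int × Int) → List (Int × Int) →
    List (Int × Int) × PySem.Set (Int × Int)
  | _, [], vis, cluster => (cluster, vis)
  | 0, _ :: _, vis, cluster => (cluster, vis)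
  | fuel + 1, cell :: q, vis, cluster =>
      let vq := pvStep tokens cell (vis, q)
      pvBFS tokens fuel vq.2 vq.1 (cluster ++ [cell])

def find_token_clusters_py (positions : List (Int × Int)) : List (List (Int × Int)) :=
  let tokens : PySem.Set (Int × Int) := PySem.Set.ofList positions
  let res := (PySem.List.sorted tokens (fun p => toLex p) false).foldl
    (fun (acc : PySem.Set (Int × Int) × List (List (Int × Int))) start =>
      if start ∈ acc.1 then acc
      else
        let r := pvBFS tokens tokens.length [start] (PySem.Set.add acc.1 start) []
        (r.2, acc.2 ++ [PySem.List.sorted r.1 (fun p => toLex p) false]))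
    ([], [])
  PySem.List.sorted res.2 (fun c => toLex c.headI) false

-- ===== PORT B =====
-- right and down neighbours of a token
def pvRD (t : Int × Int) : List (Int × Int) := [(t.1, t.2 + 1), (t.1 + 1, t.2)]

-- 'while parent[t] != t: t = parent[t]'; fuel |tokens| is enough: parents strictly decrease
def pvFind (parent : PySem.Dict (Int × Int) (Int × Int)) :
    Nat → (Int × Int) → (Int × Int)
  | 0, t => t
  | fuel + 1, t =>
      let p := parent.getD t t
      if p = t then t else pvFind parent fuel p

-- the body of the union loop for one token t: union t with its right/down neighbours
def pvUnionStep (tokens : PySem.Set (Int × Int)) (fuel : Nat)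
    (d : PySem.Dict (Int × Int) (Int × Int)) (t : Int × Int) :
    PySem.Dict (Int × Int) (Int × Int) :=
  (pvRD t).foldl
    (fun d nb =>
      if nb ∈ tokens then
        let ra := pvFind d fuel t
        let rb := pvFind d fuel nb
        if ra = rb then d
        else if toLex rb < toLex ra then d.insert ra rb else d.insert rb ra
      else d) d

def find_token_clusters_py_alt (positions : List (Int × Int)) : List (List (Int × Int)) :=
  let tokens : PySem.Set (Int × Int) := PySem.Set.ofList positions
  let ts := PySem.List.sorted tokens (fun p => toLex p) false
  let parent0 := ts.foldl (fun d t => d.insert t t) PySem.Dict.empty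
  let parent := ts.foldl (pvUnionStep tokens ts.length) parent0
  let groups := ts.foldl
    (fun (g : PySem.Dict (Int × Int) (List (Int × Int))) t =>
      g.modify (pvFind parent ts.length t) [] (fun l => l ++ [t]))
    PySem.Dict.empty
  groups.values

-- ===== PRECONDITION & SPEC =====
def Spec_find_token_clusters_py (positions : List (Int × Int)) (out : List (List (Int × Int))) : Prop := out = find_token_clusters_py_alt positions
instance (positions : List (Int × Int)) (out : List (List (Int × Int))) : Decidable (Spec_find_token_clusters_py positions out) := by unfold Spec_find_token_clusters_py; infer_instance

-- ===== CLAIM (what is proved, stated in full; the proofs are below) =====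
def Claim_equal_find_token_clusters_py : Prop := ∀ (positions : List (Int × Int)), Dom_find_token_clusters_py positions → Spec_find_token_clusters_py positions (find_token_clusters_py positions)

-- ===== LEMMAS AND PROOFS =====

-- one step of 4-adjacency inside the token set T
def pvStepRel (T : List (Int × Int)) (a b : Int × Int) : Prop :=
  a ∈ T ∧ b ∈ T ∧ b ∈ pvNbrs a

-- connectivity inside the token set T
def pvReach (T : List (Int × Int)) : (Int × Int) → (Int × Int) → Prop :=
  Relation.ReflTransGen (pvStepRel T)

noncomputable def pvReachb (T : List (Int × Int)) (a b : Int × Int) : Bool :=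
  @decide (pvReach T a b) (Classical.propDecidable _)

-- s is the lex-least member of its component of T
def pvRep (T : List (Int × Int)) (s : Int × Int) : Prop :=
  ¬ ∃ t ∈ T, toLex t < toLex s ∧ pvReach T t s

noncomputable def pvRepb (T : List (Int × Int)) (s : Int × Int) : Bool :=
  @decide (pvRep T s) (Classical.propDecidable _)

-- the component of s, listed in ts order
noncomputable def pvComp (T ts : List (Int × Int)) (s : Int × Int) : List (Int × Int) :=
  ts.filter (fun x => pvReachb T s x)

-- the canonical answer: components of the lex-least representatives, in ts order
noncomputable def pvCanon (T ts : List (Int × Int)) : List (List (Int × Int)) :=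
  (ts.filter (fun s => pvRepb T s)).map (fun s => pvComp T ts s)

theorem pvReachb_iff (T : List (Int × Int)) (a b : Int × Int) :
    pvReachb T a b = true ↔ pvReach T a b := by
  simp [pvReachb]

theorem pvRepb_iff (T : List (Int × Int)) (s : Int × Int) :
    pvRepb T s = true ↔ pvRep T s := by
  simp [pvRepb]

theorem mem_pvNbrs_symm (a b : Int × Int) : b ∈ pvNbrs a ↔ a ∈ pvNbrs b := by
  rcases a with ⟨a1, a2⟩; rcases b with ⟨b1, b2⟩
  simp [pvNbrs, Prod.ext_iff]
  omega

theorem pvNbrs_nodup (c : Int × Int) : (pvNbrs c).Nodup := by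
  rcases c with ⟨c1, c2⟩
  simp [pvNbrs, Prod.ext_iff]
  omega

theorem pvStepRel_symm (T : List (Int × Int)) {a b : Int × Int}
    (h : pvStepRel T a b) : pvStepRel T b a := by
  obtain ⟨ha, hb, hn⟩ := h
  exact ⟨hb, ha, (mem_pvNbrs_symm a b).mp hn⟩

theorem pvReach_symm (T : List (Int × Int)) {a b : Int × Int}
    (h : pvReach T a b) : pvReach T b a :=
  Relation.ReflTransGen.symmetric (fun _ _ h => pvStepRel_symm T h) h

theorem pvReach_trans (T : List (Int × Int)) {a b c : Int × Int}
    (h1 : pvReach T a b) (h2 : pvReach T b c) : pvReach T a c :=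
  Relation.ReflTransGen.trans h1 h2

theorem pvStep_fold_eq (T : List (Int × Int)) (ns : List (Int × Int))
    (hns : ns.Nodup) :
    ∀ vis q : List (Int × Int),
    ns.foldl
      (fun (vq : PySem.Set (Int × Int) × List (Int × Int)) n =>
        if n ∈ T ∧ n ∉ vq.1 then (PySem.Set.add vq.1 n, vq.2 ++ [n]) else vq) (vis, q)
      = (vis ++ ns.filter (fun n => decide (n ∈ T ∧ n ∉ vis)),
         q ++ ns.filter (fun n => decide (n ∈ T ∧ n ∉ vis))) := by
  induction ns with
  | nil => intro vis q; simp
  | cons n rest ih =>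
      intro vis q
      rw [List.foldl_cons, List.filter_cons]
      by_cases h : n ∈ T ∧ n ∉ vis
      · have hd : (decide (n ∈ T ∧ n ∉ vis)) = true := by simpa using h
        rw [if_pos h, hd]
        have hadd : PySem.Set.add vis n = vis ++ [n] := PySem.Set.add_of_not_mem h.2
        rw [hadd, ih (List.Nodup.of_cons hns) (vis ++ [n]) (q ++ [n])]
        have hfc : rest.filter (fun m => decide (m ∈ T ∧ m ∉ vis ++ [n]))
            = rest.filter (fun m => decide (m ∈ T ∧ m ∉ vis)) := by
          apply List.filter_congr
          intro m hm
          have hne : m ≠ n := by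
            rintro rfl; exact (List.nodup_cons.mp hns).1 hm
          simp [List.mem_append, hne]
        rw [hfc]
        simp
      · have hd : (decide (n ∈ T ∧ n ∉ vis)) = false := by simpa using h
        rw [if_neg h, hd]
        rw [ih (List.Nodup.of_cons hns) vis q]
        simp

theorem pvStep_eq (T : PySem.Set (Int × Int)) (cell : Int × Int)
    (vis q : List (Int × Int)) :
    pvStep T cell (vis, q)
      = (vis ++ (pvNbrs cell).filter (fun n => decide (n ∈ T ∧ n ∉ vis)),
         q ++ (pvNbrs cell).filter (fun n => decide (n ∈ T ∧ n ∉ vis))) := by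
  exact pvStep_fold_eq T (pvNbrs cell) (pvNbrs_nodup cell) vis q

theorem pvBFS_final (T : List (Int × Int)) (vis₀ : List (Int × Int)) (start : Int × Int)
    (h0 : start ∉ vis₀)
    (hclosed : ∀ x ∈ vis₀, ∀ y, pvStepRel T x y → y ∈ vis₀)
    (cl vis : List (Int × Int))
    (hnd : cl.Nodup)
    (hmem : ∀ x ∈ cl, x ∈ T ∧ pvReach T start x ∧ x ∉ vis₀)
    (hstart' : start ∈ cl)
    (hvis : ∀ x, x ∈ vis ↔ x ∈ vis₀ ∨ x ∈ cl)
    (hproc : ∀ x ∈ cl, ∀ y, pvStepRel T x y → y ∈ vis) :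
    (∀ x, x ∈ cl ↔ x ∈ T ∧ pvReach T start x) ∧ cl.Nodup ∧
    (∀ x, x ∈ vis ↔ x ∈ vis₀ ∨ (x ∈ T ∧ pvReach T start x)) := by
  have hcompl : ∀ x, pvReach T start x → x ∈ cl := by
    intro x hx
    induction hx with
    | refl => exact hstart'
    | tail hr hstep ih =>
        rename_i b c
        have hb := ih
        have hc := hproc b hb c hstep
        rcases (hvis c).mp hc with hc0 | hcl
        · exfalso
          have : b ∈ vis₀ := hclosed c hc0 b (pvStepRel_symm T hstep)
          exact (hmem b hb).2.2 this
        · exact hcl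
  have hiff : ∀ x, x ∈ cl ↔ x ∈ T ∧ pvReach T start x := by
    intro x
    constructor
    · intro hx; exact ⟨(hmem x hx).1, (hmem x hx).2.1⟩
    · intro hx; exact hcompl x hx.2
  refine ⟨hiff, hnd, ?_⟩
  intro x
  rw [hvis x, hiff x]

theorem pvBFS_spec (T : List (Int × Int)) (vis₀ : List (Int × Int)) (start : Int × Int)
    (hstart : start ∈ T) (h0 : start ∉ vis₀)
    (hclosed : ∀ x ∈ vis₀, ∀ y, pvStepRel T x y → y ∈ vis₀) :
    ∀ (fuel : Nat) (q cl vis : List (Int × Int)),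
    (cl ++ q).Nodup →
    (∀ x ∈ cl ++ q, x ∈ T ∧ pvReach T start x ∧ x ∉ vis₀) →
    start ∈ cl ++ q →
    (∀ x, x ∈ vis ↔ x ∈ vis₀ ∨ x ∈ cl ++ q) →
    (∀ x ∈ cl, ∀ y, pvStepRel T x y → y ∈ vis) →
    T.length ≤ fuel + cl.length →
    ((∀ x, x ∈ (pvBFS T fuel q vis cl).1 ↔ x ∈ T ∧ pvReach T start x) ∧
     (pvBFS T fuel q vis cl).1.Nodup ∧
     (∀ x, x ∈ (pvBFS T fuel q vis cl).2 ↔ x ∈ vis₀ ∨ (x ∈ T ∧ pvReach T start x))) := by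
  intro fuel
  induction fuel with
  | zero =>
      intro q cl vis hnd hmem hstart' hvis hproc hfuel
      cases q with
      | nil =>
          simp only [pvBFS]
          exact pvBFS_final T vis₀ start h0 hclosed cl vis (by simpa using hnd)
            (by simpa using hmem) (by simpa using hstart') (by simpa using hvis) hproc
      | cons cell q' =>
          exfalso
          have hsub : (cl ++ cell :: q') ⊆ T := fun x hx => (hmem x hx).1
          have hle : (cl ++ cell :: q').length ≤ T.length :=
            (List.subperm_of_subset hnd hsub).length_le
          simp only [List.length_append, List.length_cons] at hle
          omega
  | succ fuel ih =>
      intro q cl vis hnd hmem hstart' hvis hproc hfuel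
      cases q with
      | nil =>
          simp only [pvBFS]
          exact pvBFS_final T vis₀ start h0 hclosed cl vis (by simpa using hnd)
            (by simpa using hmem) (by simpa using hstart') (by simpa using hvis) hproc
      | cons cell q' =>
          have hcell : cell ∈ T ∧ pvReach T start cell ∧ cell ∉ vis₀ :=
            hmem cell (by simp)
          simp only [pvBFS]
          rw [pvStep_eq]
          set new := (pvNbrs cell).filter (fun n => decide (n ∈ T ∧ n ∉ vis)) with hnewdef
          have hnew_mem : ∀ n ∈ new, n ∈ T ∧ n ∉ vis := by
            intro n hn
            have := List.of_mem_filter hn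
            simpa using this
          have hnew_nbrs : ∀ n ∈ new, n ∈ pvNbrs cell := fun n hn => List.mem_of_mem_filter hn
          have hnew_nd : new.Nodup := (pvNbrs_nodup cell).filter _
          have hold_vis : ∀ x ∈ cl ++ cell :: q', x ∈ vis := by
            intro x hx; exact (hvis x).mpr (Or.inr hx)
          have hnew_reach : ∀ n ∈ new, pvReach T start n := by
            intro n hn
            exact Relation.ReflTransGen.tail hcell.2.1
              ⟨hcell.1, (hnew_mem n hn).1, hnew_nbrs n hn⟩
          have hnew_nv0 : ∀ n ∈ new, n ∉ vis₀ := by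
            intro n hn hc
            exact (hnew_mem n hn).2 ((hvis n).mpr (Or.inl hc))
          have hdisj : (cl ++ cell :: q').Disjoint new := by
            intro x hx hx'
            exact (hnew_mem x hx').2 (hold_vis x hx)
          have happ : cl ++ cell :: q' = (cl ++ [cell]) ++ q' := List.append_cons cl cell q'
          have hnd2 : ((cl ++ [cell]) ++ (q' ++ new)).Nodup := by
            have h1 : ((cl ++ cell :: q') ++ new).Nodup :=
              List.Nodup.append hnd hnew_nd hdisj
            rw [happ, List.append_assoc] at h1
            exact h1
          refine ih (q' ++ new) (cl ++ [cell]) (vis ++ new) hnd2 ?_ ?_ ?_ ?_ ?_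
          · intro x hx
            rcases List.mem_append.mp hx with hx1 | hx2
            · rcases List.mem_append.mp hx1 with hx3 | hx4
              · exact hmem x (List.mem_append.mpr (Or.inl hx3))
              · have : x = cell := by simpa using hx4
                subst this; exact hcell
            · rcases List.mem_append.mp hx2 with hx3 | hx4
              · exact hmem x (by simp [hx3])
              · exact ⟨(hnew_mem x hx4).1, hnew_reach x hx4, hnew_nv0 x hx4⟩
          · simp only [List.mem_append, List.mem_cons] at hstart' ⊢
            tauto
          · intro x
            have hv := hvis x
            simp only [List.mem_append, List.mem_cons] at hv ⊢
            tauto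
          · intro x hx y hstep
            rcases List.mem_append.mp hx with hx1 | hx2
            · exact List.mem_append.mpr (Or.inl (hproc x hx1 y hstep))
            · have : x = cell := by simpa using hx2
              subst this
              by_cases hy : y ∈ vis
              · exact List.mem_append.mpr (Or.inl hy)
              · refine List.mem_append.mpr (Or.inr ?_)
                exact List.mem_filter.mpr ⟨hstep.2.2, by simp [hstep.2.1, hy]⟩
          · simp only [List.length_append, List.length_cons, List.length_singleton] at hfuel ⊢
            omega

theorem sorted_cluster_eq_comp (T ts : List (Int × Int)) (s : Int × Int)
    (hts : ts.Nodup) (hp : ts.Pairwise (fun a b => toLex a < toLex b))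
    (hmem : ∀ x, x ∈ ts ↔ x ∈ T)
    (C : List (Int × Int)) (hC : ∀ x, x ∈ C ↔ x ∈ T ∧ pvReach T s x) (hCnd : C.Nodup) :
    PySem.List.sorted C (fun p => toLex p) false = pvComp T ts s := by
  apply PySem.List.sorted_eq_of_perm_of_pairwise_lt
  · apply (List.perm_ext_iff_of_nodup (hts.filter _) hCnd).mpr
    intro x
    rw [hC x]
    simp only [pvComp, List.mem_filter, pvReachb_iff, hmem x]
  · exact List.Pairwise.filter _ hp

theorem pvComp_headI (T ts : List (Int × Int)) (s : Int × Int)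
    (hp : ts.Pairwise (fun a b => toLex a < toLex b))
    (hmem : ∀ x, x ∈ ts ↔ x ∈ T)
    (hs : s ∈ T) (hrep : pvRep T s) :
    (pvComp T ts s).headI = s := by
  have hsmem : s ∈ pvComp T ts s := by
    simp only [pvComp, List.mem_filter, pvReachb_iff, hmem s]
    exact ⟨hs, Relation.ReflTransGen.refl⟩
  have hpc : (pvComp T ts s).Pairwise (fun a b => toLex a < toLex b) :=
    List.Pairwise.filter _ hp
  cases hcomp : pvComp T ts s with
  | nil => rw [hcomp] at hsmem; simp at hsmem
  | cons c rest =>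
      rw [hcomp] at hsmem hpc
      have hc : c ∈ pvComp T ts s := by rw [hcomp]; simp
      have hcr : c ∈ T ∧ pvReach T s c := by
        have := List.of_mem_filter hc
        have hcts := List.mem_of_mem_filter hc
        rw [pvReachb_iff] at this
        exact ⟨(hmem c).mp hcts, this⟩
      rcases (List.mem_cons).mp hsmem with rfl | hsr
      · rfl
      · exfalso
        have hlt : toLex c < toLex s := (List.pairwise_cons.mp hpc).1 s hsr
        exact hrep ⟨c, hcr.1, hlt, pvReach_symm T hcr.2⟩

theorem pairwise_lt_of_le_nodup (l : List (Int × Int))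
    (hle : l.Pairwise (fun a b => toLex a ≤ toLex b)) (hnd : l.Nodup) :
    l.Pairwise (fun a b => toLex a < toLex b) := by
  have := hle.and hnd
  exact this.imp (fun {a b} h => lt_of_le_of_ne h.1 (fun he => h.2 (toLex.injective he)))

theorem mem_take_lt (ts : List (Int × Int)) (hp : ts.Pairwise (fun a b => toLex a < toLex b))
    (k : Nat) (hk : k < ts.length) (x : Int × Int) (hx : x ∈ ts.take k) :
    toLex x < toLex ts[k] := by
  rw [List.mem_take_iff_getElem] at hx
  obtain ⟨j, hj, rfl⟩ := hx
  exact (List.pairwise_iff_getElem.mp hp) j k (by omega) hk (by omega)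

theorem lt_mem_take (ts : List (Int × Int)) (hp : ts.Pairwise (fun a b => toLex a < toLex b))
    (k : Nat) (hk : k < ts.length) (t : Int × Int) (ht : t ∈ ts)
    (hlt : toLex t < toLex ts[k]) : t ∈ ts.take k := by
  rw [List.mem_iff_getElem] at ht
  obtain ⟨j, hj, rfl⟩ := ht
  have hjk : j < k := by
    by_contra hge
    push_neg at hge
    rcases Nat.eq_or_lt_of_le hge with rfl | hlt2
    · exact lt_irrefl _ hlt
    · exact absurd ((List.pairwise_iff_getElem.mp hp) k j hk hj hlt2) (by
        intro h; exact lt_asymm hlt h)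
  rw [List.mem_take_iff_getElem]
  exact ⟨j, by omega, rfl⟩

theorem A_outer (T : PySem.Set (Int × Int)) (ts : List (Int × Int))
    (hts : ts.Nodup) (hp : ts.Pairwise (fun a b => toLex a < toLex b))
    (hmem : ∀ x, x ∈ ts ↔ x ∈ T) :
    ∀ k, k ≤ ts.length →
    (∀ x, x ∈ ((ts.take k).foldl
        (fun (acc : PySem.Set (Int × Int) × List (List (Int × Int))) start =>
          if start ∈ acc.1 then acc
          else
            let r := pvBFS T T.length [start] (PySem.Set.add acc.1 start) []
            (r.2, acc.2 ++ [PySem.List.sorted r.1 (fun p => toLex p) false]))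
        ([], [])).1 ↔ ∃ s ∈ ts.take k, x ∈ T ∧ pvReach T s x) ∧
    ((ts.take k).foldl
        (fun (acc : PySem.Set (Int × Int) × List (List (Int × Int))) start =>
          if start ∈ acc.1 then acc
          else
            let r := pvBFS T T.length [start] (PySem.Set.add acc.1 start) []
            (r.2, acc.2 ++ [PySem.List.sorted r.1 (fun p => toLex p) false]))
        ([], [])).2
      = ((ts.take k).filter (fun s => pvRepb T s)).map (fun s => pvComp T ts s) := by
  intro k
  induction k with
  | zero => intro _; simp
  | succ k ih =>
      intro hk1
      have hk : k < ts.length := by omega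
      obtain ⟨hvis, hcls⟩ := ih (by omega)
      have htake : ts.take (k + 1) = ts.take k ++ [ts[k]] := by
        rw [List.take_add_one, List.getElem?_eq_getElem hk]
        rfl
      set F := (fun (acc : PySem.Set (Int × Int) × List (List (Int × Int))) start =>
          if start ∈ acc.1 then acc
          else
            let r := pvBFS T T.length [start] (PySem.Set.add acc.1 start) []
            (r.2, acc.2 ++ [PySem.List.sorted r.1 (fun p => toLex p) false])) with hF
      set st := (ts.take k).foldl F ([], []) with hst
      have hfold : (ts.take (k+1)).foldl F ([], []) = F st ts[k] := by
        rw [htake, List.foldl_append]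
        rfl
      have hsts : ts[k] ∈ ts := List.getElem_mem hk
      have hsT : ts[k] ∈ T := (hmem _).mp hsts
      have hnotin : ts[k] ∉ ts.take k := by
        intro hc
        exact lt_irrefl _ (mem_take_lt ts hp k hk _ hc)
      rw [hfold]
      by_cases hin : ts[k] ∈ st.1
      · -- already visited: it is not a representative
        obtain ⟨s', hs', _, hr⟩ := (hvis ts[k]).mp hin
        have hs'T : s' ∈ T := ((hmem s').mp (List.mem_of_mem_take hs'))
        have hlt : toLex s' < toLex ts[k] := mem_take_lt ts hp k hk s' hs'
        have hnrep : ¬ pvRep T ts[k] := by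
          intro hrep
          exact hrep ⟨s', hs'T, hlt, hr⟩
        have hrepb : pvRepb T ts[k] = false := by
          rw [← Bool.not_eq_true, pvRepb_iff]
          exact hnrep
        rw [hF]
        simp only [if_pos hin]
        constructor
        · intro x
          rw [hvis x, htake]
          constructor
          · rintro ⟨s, hs, hxT, hxr⟩
            exact ⟨s, List.mem_append.mpr (Or.inl hs), hxT, hxr⟩
          · rintro ⟨s, hs, hxT, hxr⟩
            rcases List.mem_append.mp hs with h1 | h2
            · exact ⟨s, h1, hxT, hxr⟩
            · have : s = ts[k] := by simpa using h2
              subst this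
              exact ⟨s', hs', hxT, pvReach_trans T hr hxr⟩
        · rw [hcls, htake, List.filter_append]
          simp [hrepb]
      · -- new component: run the BFS
        have hclosed : ∀ x ∈ st.1, ∀ y, pvStepRel T x y → y ∈ st.1 := by
          intro x hx y hstep
          obtain ⟨s, hs, _, hr⟩ := (hvis x).mp hx
          exact (hvis y).mpr ⟨s, hs, hstep.2.1, pvReach_trans T hr
            (Relation.ReflTransGen.single hstep)⟩
        have hbfs := pvBFS_spec T st.1 ts[k] hsT hin hclosed T.length
          [ts[k]] [] (PySem.Set.add st.1 ts[k])
          (by simp)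
          (by
            intro x hx
            have : x = ts[k] := by simpa using hx
            subst this
            exact ⟨hsT, Relation.ReflTransGen.refl, hin⟩)
          (by simp)
          (by
            intro x
            rw [PySem.Set.add_eq_ite, if_neg hin]
            simp [List.mem_append])
          (by intro x hx; simp at hx)
          (by simp)
        obtain ⟨hcl_iff, hcl_nd, hvis_iff⟩ := hbfs
        have hrep : pvRep T ts[k] := by
          rintro ⟨t, htT, hlt, hr⟩
          have httk : t ∈ ts.take k := lt_mem_take ts hp k hk t ((hmem t).mpr htT) hlt
          exact hin ((hvis ts[k]).mpr ⟨t, httk, hsT, hr⟩)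
        have hrepb : pvRepb T ts[k] = true := (pvRepb_iff T ts[k]).mpr hrep
        have hsorted := sorted_cluster_eq_comp T ts ts[k] hts hp hmem
          (pvBFS T T.length [ts[k]] (PySem.Set.add st.1 ts[k]) []).1 hcl_iff hcl_nd
        rw [hF]
        simp only [if_neg hin]
        constructor
        · intro x
          rw [htake]
          rw [hvis_iff x]
          constructor
          · rintro (h | h)
            · obtain ⟨s, hs, hxT, hxr⟩ := (hvis x).mp h
              exact ⟨s, List.mem_append.mpr (Or.inl hs), hxT, hxr⟩
            · exact ⟨ts[k], List.mem_append.mpr (Or.inr (by simp)), h.1, h.2⟩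
          · rintro ⟨s, hs, hxT, hxr⟩
            rcases List.mem_append.mp hs with h1 | h2
            · exact Or.inl ((hvis x).mpr ⟨s, h1, hxT, hxr⟩)
            · have : s = ts[k] := by simpa using h2
              subst this
              exact Or.inr ⟨hxT, hxr⟩
        · rw [hcls, htake, List.filter_append]
          simp [hrepb, hsorted]

-- A equals the canonical clusters
theorem A_eq_canon (positions : List (Int × Int)) :
    find_token_clusters_py positions
      = pvCanon (PySem.Set.ofList positions)
          (PySem.List.sorted (PySem.Set.ofList positions) (fun p => toLex p) false) := by
  set T : PySem.Set (Int × Int) := PySem.Set.ofList positions with hT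
  set ts : List (Int × Int) := PySem.List.sorted T (fun p => toLex p) false with htsdef
  have hTnd : T.Nodup := PySem.Set.nodup_ofList positions
  have htsnd : ts.Nodup := (PySem.List.sorted_perm T (fun p => toLex p) false).nodup_iff.mpr hTnd
  have hp : ts.Pairwise (fun a b => toLex a < toLex b) :=
    pairwise_lt_of_le_nodup ts (PySem.List.sorted_pairwise T (fun p => toLex p)) htsnd
  have hmem : ∀ x, x ∈ ts ↔ x ∈ T := fun x => PySem.List.mem_sorted T (fun p => toLex p) false x
  obtain ⟨hvis, hcls⟩ := A_outer T ts htsnd hp hmem ts.length le_rfl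
  rw [List.take_length] at hvis hcls
  show PySem.List.sorted
      (ts.foldl
        (fun (acc : PySem.Set (Int × Int) × List (List (Int × Int))) start =>
          if start ∈ acc.1 then acc
          else
            let r := pvBFS T T.length [start] (PySem.Set.add acc.1 start) []
            (r.2, acc.2 ++ [PySem.List.sorted r.1 (fun p => toLex p) false]))
        ([], [])).2 (fun c => toLex c.headI) false = pvCanon T ts
  rw [hcls]
  apply PySem.List.sorted_eq_self_of_pairwise
  rw [List.pairwise_map]
  apply List.Pairwise.imp_of_mem ?_ (List.Pairwise.filter _ hp)
  intro a b ha hb hlt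
  have harep : pvRep T a := (pvRepb_iff T a).mp (List.of_mem_filter ha)
  have hbrep : pvRep T b := (pvRepb_iff T b).mp (List.of_mem_filter hb)
  have haT : a ∈ T := (hmem a).mp (List.mem_of_mem_filter ha)
  have hbT : b ∈ T := (hmem b).mp (List.mem_of_mem_filter hb)
  rw [pvComp_headI T ts a hp hmem haT harep, pvComp_headI T ts b hp hmem hbT hbrep]
  exact le_of_lt hlt

-- ---------- B side ----------

-- invariant of the parent map: parents stay in T, never increase, and stay in the component
def pvUInv (T : List (Int × Int)) (d : PySem.Dict (Int × Int) (Int × Int)) : Prop :=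
  ∀ t ∈ T, d.getD t t ∈ T ∧ toLex (d.getD t t) ≤ toLex t ∧ pvReach T t (d.getD t t)

theorem pvFind_fix (d : PySem.Dict (Int × Int) (Int × Int)) (r : Int × Int)
    (h : d.getD r r = r) : ∀ n, pvFind d n r = r := by
  intro n
  cases n with
  | zero => rfl
  | succ n => simp [pvFind, h]

theorem pvFind_step (d : PySem.Dict (Int × Int) (Int × Int)) (t : Int × Int) (n : Nat)
    (h : d.getD t t ≠ t) : pvFind d (n + 1) t = pvFind d n (d.getD t t) := by
  simp [pvFind, h]

theorem rank_lt_of_lt (ts : List (Int × Int))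
    (hp : ts.Pairwise (fun a b => toLex a < toLex b))
    (a b : Int × Int) (ha : a ∈ ts) (hb : b ∈ ts) (hab : toLex a < toLex b) :
    ts.idxOf a < ts.idxOf b := by
  have hal : ts.idxOf a < ts.length := List.idxOf_lt_length_of_mem ha
  have hbl : ts.idxOf b < ts.length := List.idxOf_lt_length_of_mem hb
  by_contra hge
  push_neg at hge
  rcases Nat.eq_or_lt_of_le hge with heq | hlt
  · have ha' : ts[ts.idxOf a] = a := List.getElem_idxOf hal
    have hb' : ts[ts.idxOf b] = b := List.getElem_idxOf hbl
    simp only [heq] at hb'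
    rw [ha'] at hb'
    subst hb'
    exact lt_irrefl _ hab
  · have := (List.pairwise_iff_getElem.mp hp) _ _ hbl hal hlt
    rw [List.getElem_idxOf hal, List.getElem_idxOf hbl] at this
    exact lt_asymm hab this

theorem pvFind_spec (T : List (Int × Int)) (ts : List (Int × Int))
    (hmem : ∀ x, x ∈ ts ↔ x ∈ T)
    (hp : ts.Pairwise (fun a b => toLex a < toLex b))
    (d : PySem.Dict (Int × Int) (Int × Int)) (hinv : pvUInv T d) :
    ∀ (n : Nat) (t : Int × Int), t ∈ T → ts.idxOf t < n →
      (d.getD (pvFind d n t) (pvFind d n t) = pvFind d n t ∧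
       pvFind d n t ∈ T ∧ pvReach T t (pvFind d n t) ∧
       toLex (pvFind d n t) ≤ toLex t) := by
  intro n
  induction n with
  | zero => intro t _ h; omega
  | succ n ih =>
      intro t htT hrk
      by_cases hfix : d.getD t t = t
      · rw [pvFind_fix d t hfix]
        exact ⟨hfix, htT, Relation.ReflTransGen.refl, le_refl _⟩
      · set p := d.getD t t with hpdef
        obtain ⟨hpT, hple, hpr⟩ := hinv t htT
        have hplt : toLex p < toLex t :=
          lt_of_le_of_ne hple (fun he => hfix (toLex.injective he))
        have hrkp : ts.idxOf p < ts.idxOf t :=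
          rank_lt_of_lt ts hp p t ((hmem p).mpr hpT) ((hmem t).mpr htT) hplt
        rw [pvFind_step d t n hfix]
        obtain ⟨h1, h2, h3, h4⟩ := ih p hpT (by omega)
        exact ⟨h1, h2, pvReach_trans T hpr h3, le_trans h4 hple⟩

theorem pvFind_fuel_irrel (T : List (Int × Int)) (ts : List (Int × Int))
    (hmem : ∀ x, x ∈ ts ↔ x ∈ T)
    (hp : ts.Pairwise (fun a b => toLex a < toLex b))
    (d : PySem.Dict (Int × Int) (Int × Int)) (hinv : pvUInv T d) :
    ∀ (n m : Nat) (t : Int × Int), t ∈ T → ts.idxOf t < n → ts.idxOf t < m →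
      pvFind d n t = pvFind d m t := by
  intro n
  induction n with
  | zero => intro m t _ h; omega
  | succ n ih =>
      intro m t htT hn hm
      by_cases hfix : d.getD t t = t
      · rw [pvFind_fix d t hfix, pvFind_fix d t hfix]
      · set p := d.getD t t with hpdef
        obtain ⟨hpT, hple, hpr⟩ := hinv t htT
        have hplt : toLex p < toLex t :=
          lt_of_le_of_ne hple (fun he => hfix (toLex.injective he))
        have hrkp : ts.idxOf p < ts.idxOf t :=
          rank_lt_of_lt ts hp p t ((hmem p).mpr hpT) ((hmem t).mpr htT) hplt
        cases m with
        | zero => omega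
        | succ m =>
            rw [pvFind_step d t n hfix, pvFind_step d t m hfix]
            exact ih m p hpT (by omega) (by omega)

theorem pvRoot_insert (T ts : List (Int × Int))
    (hmem : ∀ x, x ∈ ts ↔ x ∈ T)
    (hp : ts.Pairwise (fun a b => toLex a < toLex b))
    (d : PySem.Dict (Int × Int) (Int × Int)) (hinv : pvUInv T d)
    (ra rb : Int × Int) (hraT : ra ∈ T) (hrbT : rb ∈ T)
    (hfa : d.getD ra ra = ra) (hfb : d.getD rb rb = rb)
    (hlt : toLex ra < toLex rb) (hreach : pvReach T rb ra) :
    pvUInv T (d.insert rb ra) ∧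
    (∀ t ∈ T, pvFind (d.insert rb ra) ts.length t
        = if pvFind d ts.length t = rb then ra else pvFind d ts.length t) := by
  have hne : ra ≠ rb := fun h => by rw [h] at hlt; exact lt_irrefl _ hlt
  have hinv' : pvUInv T (d.insert rb ra) := by
    intro t htT
    by_cases htb : t = rb
    · subst htb
      rw [PySem.Dict.getD_insert_self]
      exact ⟨hraT, le_of_lt hlt, hreach⟩
    · rw [PySem.Dict.getD_insert_of_ne d _ _ htb]
      exact hinv t htT
  refine ⟨hinv', ?_⟩
  have hfra' : (d.insert rb ra).getD ra ra = ra := by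
    rw [PySem.Dict.getD_insert_of_ne d _ _ hne]; exact hfa
  have key : ∀ n, ∀ t ∈ T, ts.idxOf t < n →
      pvFind (d.insert rb ra) ts.length t
        = if pvFind d ts.length t = rb then ra else pvFind d ts.length t := by
    intro n
    induction n with
    | zero => intro t _ h; omega
    | succ n ih =>
        intro t htT hrk
        have hlen : ts.idxOf t < ts.length :=
          List.idxOf_lt_length_of_mem ((hmem t).mpr htT)
        obtain ⟨m, hm⟩ : ∃ m, ts.length = m + 1 := ⟨ts.length - 1, by omega⟩
        by_cases hfix : d.getD t t = t
        · by_cases htb : t = rb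
          · subst htb
            have hpf : (d.insert t ra).getD t t = ra := PySem.Dict.getD_insert_self d t ra t
            rw [pvFind_fix d t hfix, if_pos rfl, hm,
              pvFind_step _ t m (by rw [hpf]; exact hne), hpf]
            exact pvFind_fix _ ra hfra' m
          · have hpfx : (d.insert rb ra).getD t t = t := by
              rw [PySem.Dict.getD_insert_of_ne d _ _ htb]; exact hfix
            rw [pvFind_fix _ t hpfx, pvFind_fix d t hfix, if_neg htb]
        · have htb : t ≠ rb := fun h => by rw [h] at hfix; exact hfix hfb
          obtain ⟨hpT, hple, hpr⟩ := hinv t htT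
          have hplt : toLex (d.getD t t) < toLex t :=
            lt_of_le_of_ne hple (fun he => hfix (toLex.injective he))
          have hrkp : ts.idxOf (d.getD t t) < ts.idxOf t :=
            rank_lt_of_lt ts hp _ t ((hmem _).mpr hpT) ((hmem t).mpr htT) hplt
          have hpf't : (d.insert rb ra).getD t t = d.getD t t :=
            PySem.Dict.getD_insert_of_ne d _ _ htb
          have hstep' : pvFind (d.insert rb ra) ts.length t
              = pvFind (d.insert rb ra) m (d.getD t t) := by
            rw [hm, pvFind_step _ t m (by rw [hpf't]; exact hfix), hpf't]
          have hstep : pvFind d ts.length t = pvFind d m (d.getD t t) := by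
            rw [hm, pvFind_step d t m hfix]
          rw [hstep', hstep,
            pvFind_fuel_irrel T ts hmem hp _ hinv' m ts.length _ hpT (by omega) (by omega),
            pvFind_fuel_irrel T ts hmem hp d hinv m ts.length _ hpT (by omega) (by omega)]
          exact ih _ hpT (by omega)
  intro t htT
  exact key (ts.idxOf t + 1) t htT (Nat.lt_succ_self _)

-- one application of the inner body of the union loop
def pvU1 (T : PySem.Set (Int × Int)) (fuel : Nat) (t : Int × Int)
    (d : PySem.Dict (Int × Int) (Int × Int)) (nb : Int × Int) :
    PySem.Dict (Int × Int) (Int × Int) :=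
  if nb ∈ T then
    let ra := pvFind d fuel t
    let rb := pvFind d fuel nb
    if ra = rb then d
    else if toLex rb < toLex ra then d.insert ra rb else d.insert rb ra
  else d

theorem pvU1_spec (T ts : List (Int × Int))
    (hmem : ∀ x, x ∈ ts ↔ x ∈ T)
    (hp : ts.Pairwise (fun a b => toLex a < toLex b))
    (d : PySem.Dict (Int × Int) (Int × Int)) (hinv : pvUInv T d)
    (t nb : Int × Int) (htT : t ∈ T) (hnbr : nb ∈ pvNbrs t) :
    pvUInv T (pvU1 T ts.length t d nb) ∧
    (∀ a ∈ T, ∀ b ∈ T, pvFind d ts.length a = pvFind d ts.length b →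
       pvFind (pvU1 T ts.length t d nb) ts.length a
         = pvFind (pvU1 T ts.length t d nb) ts.length b) ∧
    (nb ∈ T → pvFind (pvU1 T ts.length t d nb) ts.length t
         = pvFind (pvU1 T ts.length t d nb) ts.length nb) := by
  unfold pvU1
  by_cases hnbT : nb ∈ T
  · simp only [if_pos hnbT]
    have hrkt : ts.idxOf t < ts.length := List.idxOf_lt_length_of_mem ((hmem t).mpr htT)
    have hrknb : ts.idxOf nb < ts.length := List.idxOf_lt_length_of_mem ((hmem nb).mpr hnbT)
    obtain ⟨hfixa, hraT, hreachta, _⟩ := pvFind_spec T ts hmem hp d hinv ts.length t htT hrkt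
    obtain ⟨hfixb, hrbT, hreachnb, _⟩ := pvFind_spec T ts hmem hp d hinv ts.length nb hnbT hrknb
    set ra := pvFind d ts.length t with hra
    set rb := pvFind d ts.length nb with hrb
    have hreach_ra_rb : pvReach T ra rb :=
      pvReach_trans T (pvReach_symm T hreachta)
        (pvReach_trans T (Relation.ReflTransGen.single ⟨htT, hnbT, hnbr⟩) hreachnb)
    by_cases heq : ra = rb
    · simp only [if_pos heq]
      exact ⟨hinv, fun a _ b _ h => h, fun _ => heq⟩
    · simp only [if_neg heq]
      by_cases hba : toLex rb < toLex ra
      · simp only [if_pos hba]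
        obtain ⟨hinv2, hroots⟩ := pvRoot_insert T ts hmem hp d hinv rb ra hrbT hraT
          hfixb hfixa hba hreach_ra_rb
        refine ⟨hinv2, ?_, ?_⟩
        · intro a haT b hbT h
          rw [hroots a haT, hroots b hbT, h]
        · intro _
          rw [hroots t htT, hroots nb hnbT, ← hra, ← hrb]
          simp [Ne.symm heq]
      · have hab : toLex ra < toLex rb :=
          lt_of_le_of_ne (not_lt.mp hba) (fun h => heq (toLex.injective h))
        simp only [if_neg hba]
        obtain ⟨hinv2, hroots⟩ := pvRoot_insert T ts hmem hp d hinv ra rb hraT hrbT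
          hfixa hfixb hab (pvReach_symm T hreach_ra_rb)
        refine ⟨hinv2, ?_, ?_⟩
        · intro a haT b hbT h
          rw [hroots a haT, hroots b hbT, h]
        · intro _
          rw [hroots t htT, hroots nb hnbT, ← hra, ← hrb]
          simp [Ne.symm heq]
  · simp only [if_neg hnbT]
    exact ⟨hinv, fun a _ b _ h => h, fun h => absurd h hnbT⟩

theorem pvUnionStep_spec (T ts : List (Int × Int))
    (hmem : ∀ x, x ∈ ts ↔ x ∈ T)
    (hp : ts.Pairwise (fun a b => toLex a < toLex b))
    (d : PySem.Dict (Int × Int) (Int × Int)) (hinv : pvUInv T d)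
    (t : Int × Int) (htT : t ∈ T) :
    pvUInv T (pvUnionStep T ts.length d t) ∧
    (∀ a ∈ T, ∀ b ∈ T, pvFind d ts.length a = pvFind d ts.length b →
       pvFind (pvUnionStep T ts.length d t) ts.length a
         = pvFind (pvUnionStep T ts.length d t) ts.length b) ∧
    (∀ nb ∈ pvRD t, nb ∈ T →
       pvFind (pvUnionStep T ts.length d t) ts.length t
         = pvFind (pvUnionStep T ts.length d t) ts.length nb) := by
  have hnbr1 : (t.1, t.2 + 1) ∈ pvNbrs t := by simp [pvNbrs]
  have hnbr2 : (t.1 + 1, t.2) ∈ pvNbrs t := by simp [pvNbrs]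
  have hstep : pvUnionStep T ts.length d t
      = pvU1 T ts.length t (pvU1 T ts.length t d (t.1, t.2 + 1)) (t.1 + 1, t.2) := rfl
  obtain ⟨hinv1, hpres1, hedge1⟩ :=
    pvU1_spec T ts hmem hp d hinv t (t.1, t.2 + 1) htT hnbr1
  obtain ⟨hinv2, hpres2, hedge2⟩ :=
    pvU1_spec T ts hmem hp (pvU1 T ts.length t d (t.1, t.2 + 1)) hinv1 t (t.1 + 1, t.2) htT hnbr2
  rw [hstep]
  refine ⟨hinv2, ?_, ?_⟩
  · intro a haT b hbT h
    exact hpres2 a haT b hbT (hpres1 a haT b hbT h)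
  · intro nb hnb hnbT
    rcases (by simpa [pvRD] using hnb : nb = (t.1, t.2 + 1) ∨ nb = (t.1 + 1, t.2)) with rfl | rfl
    · exact hpres2 t htT _ hnbT (hedge1 hnbT)
    · exact hedge2 hnbT

theorem pvUnionFold (T ts : List (Int × Int))
    (hmem : ∀ x, x ∈ ts ↔ x ∈ T)
    (hp : ts.Pairwise (fun a b => toLex a < toLex b))
    (d0 : PySem.Dict (Int × Int) (Int × Int)) (h0 : pvUInv T d0) :
    ∀ k, k ≤ ts.length →
    pvUInv T ((ts.take k).foldl (pvUnionStep T ts.length) d0) ∧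
    (∀ t ∈ ts.take k, ∀ nb ∈ pvRD t, nb ∈ T →
      pvFind ((ts.take k).foldl (pvUnionStep T ts.length) d0) ts.length t
        = pvFind ((ts.take k).foldl (pvUnionStep T ts.length) d0) ts.length nb) := by
  intro k
  induction k with
  | zero =>
      intro _
      refine ⟨by simpa using h0, ?_⟩
      intro t ht
      simp at ht
  | succ k ih =>
      intro hk1
      have hk : k < ts.length := by omega
      obtain ⟨hinvk, hedgek⟩ := ih (by omega)
      have htake : ts.take (k + 1) = ts.take k ++ [ts[k]] := by
        rw [List.take_add_one, List.getElem?_eq_getElem hk]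
        rfl
      set dk := (ts.take k).foldl (pvUnionStep T ts.length) d0 with hdk
      have hfold : (ts.take (k + 1)).foldl (pvUnionStep T ts.length) d0
          = pvUnionStep T ts.length dk ts[k] := by
        rw [htake, List.foldl_append]
        rfl
      have hsT : ts[k] ∈ T := (hmem _).mp (List.getElem_mem hk)
      obtain ⟨hinv2, hpres2, hedge2⟩ := pvUnionStep_spec T ts hmem hp dk hinvk ts[k] hsT
      rw [hfold]
      refine ⟨hinv2, ?_⟩
      intro t ht nb hnb hnbT
      rcases List.mem_append.mp (htake ▸ ht) with h1 | h2
      · have htT : t ∈ T := (hmem t).mp (List.mem_of_mem_take h1)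
        exact hpres2 t htT nb hnbT (hedgek t h1 nb hnb hnbT)
      · have : t = ts[k] := by simpa using h2
        subst this
        exact hedge2 nb hnb hnbT

theorem parent0_getD (l : List (Int × Int)) :
    ∀ (d : PySem.Dict (Int × Int) (Int × Int)), (∀ x, d.getD x x = x) →
    ∀ x, (l.foldl (fun d t => d.insert t t) d).getD x x = x := by
  induction l with
  | nil => intro d h x; exact h x
  | cons t rest ih =>
      intro d h x
      refine ih (d.insert t t) ?_ x
      intro y
      by_cases hy : y = t
      · subst hy; exact PySem.Dict.getD_insert_self d y y y
      · rw [PySem.Dict.getD_insert_of_ne d _ _ hy]; exact h y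

theorem mem_pvNbrs_iff_rd (a b : Int × Int) :
    b ∈ pvNbrs a ↔ b ∈ pvRD a ∨ a ∈ pvRD b := by
  rcases a with ⟨a1, a2⟩; rcases b with ⟨b1, b2⟩
  simp [pvNbrs, pvRD, Prod.ext_iff]
  omega

theorem pvRoot_eq_iff (T ts : List (Int × Int))
    (hmem : ∀ x, x ∈ ts ↔ x ∈ T)
    (hp : ts.Pairwise (fun a b => toLex a < toLex b))
    (d : PySem.Dict (Int × Int) (Int × Int)) (hinv : pvUInv T d)
    (hcompl : ∀ t ∈ T, ∀ nb ∈ pvRD t, nb ∈ T →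
      pvFind d ts.length t = pvFind d ts.length nb)
    (a b : Int × Int) (haT : a ∈ T) (hbT : b ∈ T) :
    (pvFind d ts.length a = pvFind d ts.length b ↔ pvReach T a b) := by
  constructor
  · intro h
    obtain ⟨_, _, hra, _⟩ := pvFind_spec T ts hmem hp d hinv ts.length a haT
      (List.idxOf_lt_length_of_mem ((hmem a).mpr haT))
    obtain ⟨_, _, hrb, _⟩ := pvFind_spec T ts hmem hp d hinv ts.length b hbT
      (List.idxOf_lt_length_of_mem ((hmem b).mpr hbT))
    exact pvReach_trans T hra (h ▸ pvReach_symm T hrb)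
  · intro h
    induction h with
    | refl => rfl
    | tail hr hstep ih =>
        rename_i x y
        obtain ⟨hxT, hyT, hnbr⟩ := hstep
        have hxy : pvFind d ts.length x = pvFind d ts.length y := by
          rcases (mem_pvNbrs_iff_rd x y).mp hnbr with h1 | h2
          · exact hcompl x hxT y h1 hyT
          · exact (hcompl y hyT x h2 hxT).symm
        exact (ih hxT).trans hxy

theorem group_values (ts : List (Int × Int)) (m : (Int × Int) → (Int × Int)) :
    (ts.foldl (fun (g : PySem.Dict (Int × Int) (List (Int × Int))) t =>
        g.modify (m t) [] (fun l => l ++ [t])) PySem.Dict.empty).values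
      = (PySem.Set.ofList (ts.map m)).map (fun r => ts.filter (fun t => m t == r)) := by
  have hkeys : (ts.foldl (fun (g : PySem.Dict (Int × Int) (List (Int × Int))) t =>
        g.modify (m t) [] (fun l => l ++ [t])) PySem.Dict.empty).keys
      = PySem.Set.ofList (ts.map m) := by
    rw [PySem.Dict.keys_foldl_modify_key ts m [] (fun _ x => fun l => l ++ [x]) PySem.Dict.empty]
    rw [show (PySem.Dict.empty : PySem.Dict (Int × Int) (List (Int × Int))).keys
        = PySem.Set.empty from rfl]
    exact PySem.Set.update_empty (ts.map m)
  have hnd : (ts.foldl (fun (g : PySem.Dict (Int × Int) (List (Int × Int))) t =>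
        g.modify (m t) [] (fun l => l ++ [t])) PySem.Dict.empty).keys.Nodup := by
    rw [hkeys]; exact PySem.Set.nodup_ofList _
  rw [PySem.Dict.values_eq_map_keys _ hnd [], hkeys]
  apply List.map_congr_left
  intro r _
  have hfm : ts.foldl (fun (g : PySem.Dict (Int × Int) (List (Int × Int))) t =>
        g.modify (m t) [] (fun l => l ++ [t])) PySem.Dict.empty
      = (ts.map (fun t => (m t, t))).foldl
          (fun g p => g.modify p.1 [] (fun l => l ++ [p.2])) PySem.Dict.empty := by
    rw [List.foldl_map]
  rw [hfm, PySem.Dict.getD_foldl_modify_append]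
  rw [show (PySem.Dict.empty : PySem.Dict (Int × Int) (List (Int × Int))).getD r [] = [] from rfl]
  rw [List.filter_map]
  rw [List.map_map]
  simp [Function.comp_def]

theorem ofList_map_eq_reps (T ts : List (Int × Int))
    (hmem : ∀ x, x ∈ ts ↔ x ∈ T)
    (hp : ts.Pairwise (fun a b => toLex a < toLex b))
    (m : (Int × Int) → (Int × Int))
    (hiff : ∀ a ∈ T, ∀ b ∈ T, (m a = m b ↔ pvReach T a b)) :
    ∀ k, k ≤ ts.length →
    PySem.Set.ofList ((ts.take k).map m)
      = ((ts.take k).filter (fun s => pvRepb T s)).map m := by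
  intro k
  induction k with
  | zero => intro _; simp
  | succ k ih =>
      intro hk1
      have hk : k < ts.length := by omega
      have htake : ts.take (k + 1) = ts.take k ++ [ts[k]] := by
        rw [List.take_add_one, List.getElem?_eq_getElem hk]
        rfl
      have hsT : ts[k] ∈ T := (hmem _).mp (List.getElem_mem hk)
      rw [htake, List.map_append]
      simp only [List.map_cons, List.map_nil]
      rw [PySem.Set.ofList_append_singleton, List.filter_append]
      by_cases hmemm : m ts[k] ∈ (ts.take k).map m
      · obtain ⟨t, ht, hmt⟩ := List.mem_map.mp hmemm
        have htT : t ∈ T := (hmem t).mp (List.mem_of_mem_take ht)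
        have hlt : toLex t < toLex ts[k] := mem_take_lt ts hp k hk t ht
        have hreach : pvReach T t ts[k] := (hiff t htT ts[k] hsT).mp hmt
        have hnrep : pvRepb T ts[k] = false := by
          rw [← Bool.not_eq_true, pvRepb_iff]
          intro hrep
          exact hrep ⟨t, htT, hlt, hreach⟩
        rw [PySem.Set.add_of_mem (by rw [PySem.Set.mem_ofList]; exact hmemm)]
        have hfs : List.filter (fun s => pvRepb T s) [ts[k]] = [] := by simp [hnrep]
        rw [hfs, List.append_nil]
        exact ih (by omega)
      · have hrep : pvRep T ts[k] := by
          rintro ⟨t, htT, hlt, hr⟩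
          have htk : t ∈ ts.take k := lt_mem_take ts hp k hk t ((hmem t).mpr htT) hlt
          exact hmemm (List.mem_map.mpr ⟨t, htk, (hiff t htT ts[k] hsT).mpr hr⟩)
        have hrepb : pvRepb T ts[k] = true := (pvRepb_iff T ts[k]).mpr hrep
        rw [PySem.Set.add_of_not_mem (by rw [PySem.Set.mem_ofList]; exact hmemm)]
        rw [ih (by omega)]
        have hfs : List.filter (fun s => pvRepb T s) [ts[k]] = [ts[k]] := by simp [hrepb]
        rw [hfs, List.map_append, List.map_cons, List.map_nil]

theorem B_eq_canon (positions : List (Int × Int)) :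
    find_token_clusters_py_alt positions
      = pvCanon (PySem.Set.ofList positions)
          (PySem.List.sorted (PySem.Set.ofList positions) (fun p => toLex p) false) := by
  set T : PySem.Set (Int × Int) := PySem.Set.ofList positions with hT
  set ts : List (Int × Int) := PySem.List.sorted T (fun p => toLex p) false with htsdef
  have hTnd : T.Nodup := PySem.Set.nodup_ofList positions
  have htsnd : ts.Nodup := (PySem.List.sorted_perm T (fun p => toLex p) false).nodup_iff.mpr hTnd
  have hp : ts.Pairwise (fun a b => toLex a < toLex b) :=
    pairwise_lt_of_le_nodup ts (PySem.List.sorted_pairwise T (fun p => toLex p)) htsnd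
  have hmem : ∀ x, x ∈ ts ↔ x ∈ T :=
    fun x => PySem.List.mem_sorted T (fun p => toLex p) false x
  set parent0 := ts.foldl (fun d t => d.insert t t) PySem.Dict.empty with hpar0
  have h0fix : ∀ x, parent0.getD x x = x :=
    parent0_getD ts PySem.Dict.empty (fun x => rfl)
  have h0inv : pvUInv T parent0 := by
    intro t htT
    rw [h0fix t]
    exact ⟨htT, le_refl _, Relation.ReflTransGen.refl⟩
  set parent := ts.foldl (pvUnionStep T ts.length) parent0 with hpar
  obtain ⟨hinvF, hcomplF⟩ := pvUnionFold T ts hmem hp parent0 h0inv ts.length le_rfl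
  rw [List.take_length] at hinvF hcomplF
  have hcompl : ∀ t ∈ T, ∀ nb ∈ pvRD t, nb ∈ T →
      pvFind parent ts.length t = pvFind parent ts.length nb := by
    intro t htT nb h1 h2
    exact hcomplF t ((hmem t).mpr htT) nb h1 h2
  have hiff : ∀ a ∈ T, ∀ b ∈ T,
      (pvFind parent ts.length a = pvFind parent ts.length b ↔ pvReach T a b) :=
    fun a ha b hb => pvRoot_eq_iff T ts hmem hp parent hinvF hcompl a b ha hb
  show (ts.foldl
      (fun (g : PySem.Dict (Int × Int) (List (Int × Int))) t =>
        g.modify (pvFind parent ts.length t) [] (fun l => l ++ [t]))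
      PySem.Dict.empty).values = pvCanon T ts
  rw [group_values ts (fun t => pvFind parent ts.length t)]
  have hofl := ofList_map_eq_reps T ts hmem hp (fun t => pvFind parent ts.length t)
    hiff ts.length le_rfl
  rw [List.take_length] at hofl
  rw [hofl, List.map_map]
  apply List.map_congr_left
  intro s hs
  simp only [Function.comp_apply]
  apply List.filter_congr
  intro t ht
  have hsT : s ∈ T := (hmem s).mp (List.mem_of_mem_filter hs)
  have htT : t ∈ T := (hmem t).mp ht
  rw [Bool.eq_iff_iff, beq_iff_eq, pvReachb_iff, hiff t htT s hsT]
  exact ⟨pvReach_symm T, pvReach_symm T⟩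

-- ===== VERDICT (by name: the statement is the Claim_ definition above) =====
theorem find_token_clusters_py_spec : Claim_equal_find_token_clusters_py := by
  intro positions _
  unfold Spec_find_token_clusters_py
  rw [A_eq_canon, B_eq_canon]
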